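-- pv_equiv track=rewrite | github.com/JorgeC22/workcloud | controlador.py | ocultarCorreo
-- ===== SOURCE A (Python) =====
-- def ocultarCorreo(correoUsuario):
--     listCaracteres = list(correoUsuario)
--     newString = ""
--
--     for x in range(0,correoUsuario.find("@")-2):
--         listCaracteres[x] = "#"
--
--     for c in listCaracteres:
--         if newString == "":
--             newString = ""+c
--         else:
--             newString = newString + c
--
--     return newString
-- ===== SOURCE B (Python) =====
-- def ocultarCorreo(correoUsuario):
--     k = correoUsuario.find("@") - 2
--     if k < 0:
--         k = 0
--     return "#" * k + correoUsuario[k:]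
-- ===== Notes on version B (the rewrite author's own statement) =====
-- stated objective: simpler
-- what changed: Replaces A's per-character mutation loop plus per-character string-rebuilding loop with a closed-form construction: clamp k = find('@')-2 to 0, then '#'*k + s[k:].
import Mathlib
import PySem

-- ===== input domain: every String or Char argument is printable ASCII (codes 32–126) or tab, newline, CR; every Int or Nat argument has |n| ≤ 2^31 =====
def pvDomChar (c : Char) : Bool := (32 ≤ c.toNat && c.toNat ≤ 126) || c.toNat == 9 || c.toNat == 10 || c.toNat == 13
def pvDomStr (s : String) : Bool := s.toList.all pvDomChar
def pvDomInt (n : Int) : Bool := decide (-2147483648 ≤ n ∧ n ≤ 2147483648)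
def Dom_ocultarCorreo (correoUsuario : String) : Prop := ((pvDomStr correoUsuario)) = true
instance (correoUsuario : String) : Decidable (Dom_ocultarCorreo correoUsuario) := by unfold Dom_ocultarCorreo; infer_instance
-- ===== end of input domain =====

-- B replaces A's two character loops by the closed form '#' * max(find('@')-2, 0) + s[k:]; objective: simpler.

-- ===== PORT A =====
def ocultarCorreo (correoUsuario : String) : String :=
  let listCaracteres := correoUsuario.toList
  -- for x in range(0, correoUsuario.find("@") - 2): listCaracteres[x] = "#"
  -- (exact: every x produced by this range is ≥ 0 and < len, so List.set x.toNat is Python's assignment)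
  let masked := (PySem.List.pyRange 0 (PySem.Str.find correoUsuario "@" - 2) 1).foldl
      (fun l x => l.set x.toNat '#') listCaracteres
  -- for c in listCaracteres: if newString == "": newString = "" + c else: newString = newString + c
  masked.foldl (fun newString c =>
      if newString == "" then "" ++ String.singleton c else newString ++ String.singleton c) ""

-- ===== PORT B =====
def ocultarCorreo_alt (correoUsuario : String) : String :=
  let k := PySem.Str.find correoUsuario "@" - 2
  let k := if k < 0 then (0 : Int) else k
  -- "#" * k  ++  correoUsuario[k:]
  String.ofList (List.replicate k.toNat '#') ++ PySem.Str.slice correoUsuario (some k) none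

-- ===== PRECONDITION & SPEC =====
def Spec_ocultarCorreo (correoUsuario : String) (out : String) : Prop := out = ocultarCorreo_alt correoUsuario
instance (correoUsuario : String) (out : String) : Decidable (Spec_ocultarCorreo correoUsuario out) := by unfold Spec_ocultarCorreo; infer_instance

-- ===== CLAIM (what is proved, stated in full; the proofs are below) =====
def Claim_equal_ocultarCorreo : Prop := ∀ (correoUsuario : String), Dom_ocultarCorreo correoUsuario → Spec_ocultarCorreo correoUsuario (ocultarCorreo correoUsuario)

-- ===== LEMMAS AND PROOFS =====

-- A's second loop just concatenates the characters back into a string.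
lemma build_loop (l : List Char) (acc : String) :
    l.foldl (fun newString c =>
      if newString == "" then "" ++ String.singleton c else newString ++ String.singleton c) acc
    = acc ++ String.ofList l := by
  induction l generalizing acc with
  | nil => exact (String.toList_inj.mp (by simp)).symm
  | cons c cs ih =>
      have hstep : (if acc == "" then "" ++ String.singleton c else acc ++ String.singleton c)
          = acc ++ String.singleton c := by
        by_cases h : acc = "" <;> simp [h]
      simp only [List.foldl_cons, hstep, ih]
      apply String.toList_inj.mp
      simp

-- A's first loop turns the first k characters into '#'.
lemma mask_loop (l : List Char) (k : Nat) (hk : k ≤ l.length) :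
    (PySem.List.pyRange 0 (k : Int) 1).foldl (fun l x => l.set x.toNat '#') l
    = List.replicate k '#' ++ l.drop k := by
  induction k with
  | zero => simp [PySem.List.pyRange_one_eq_nil]
  | succ n ih =>
      have hn : n ≤ l.length := Nat.le_of_succ_le hk
      have hr : PySem.List.pyRange 0 ((n + 1 : Nat) : Int) 1
          = PySem.List.pyRange 0 (n : Int) 1 ++ [(n : Int)] := by
        have := PySem.List.pyRange_one_succ_right (a := 0) (b := (n : Int)) (by exact_mod_cast Nat.zero_le n)
        simpa using this
      rw [hr, List.foldl_append, ih hn]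
      simp only [List.foldl_cons, List.foldl_nil, Int.toNat_natCast]
      rw [List.set_append_right _ _ (by simp)]
      simp only [List.length_replicate, Nat.sub_self]
      have hd : List.drop n l = l[n] :: List.drop (n + 1) l :=
        List.drop_eq_getElem_cons (by omega)
      rw [hd, List.set_cons_zero, List.replicate_succ']
      simp

-- ===== VERDICT (by name: the statement is the Claim_ definition above) =====
theorem ocultarCorreo_spec : Claim_equal_ocultarCorreo := by
  intro s _
  unfold Spec_ocultarCorreo ocultarCorreo ocultarCorreo_alt
  simp only [PySem.Str.find_eq]
  by_cases hneg : PySem.Chars.find s.toList ("@".toList) - 2 < 0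
  · rw [PySem.List.pyRange_one_eq_nil (by omega), if_pos hneg]
    simp only [List.foldl_nil, build_loop]
    apply String.toList_inj.mp
    simp [PySem.List.slice_zero_start, PySem.List.slice_none_none]
  · have hne : PySem.Chars.find s.toList ("@".toList) ≠ -1 := by omega
    have hpre : ("@".toList) <+: s.toList.drop (PySem.Chars.find s.toList ("@".toList)).toNat := by
      obtain ⟨-, h2, -⟩ := PySem.Chars.findFrom_natCast_spec s.toList ("@".toList) 0
        (Nat.zero_le _) (by simpa using hne)
      simpa using h2
    have hflt : (PySem.Chars.find s.toList ("@".toList)).toNat < s.toList.length := by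
      by_contra hge
      rw [List.drop_eq_nil_of_le (by omega)] at hpre
      simp at hpre
    have hcast : (((PySem.Chars.find s.toList ("@".toList) - 2).toNat : Nat) : Int)
        = PySem.Chars.find s.toList ("@".toList) - 2 := by omega
    have hm : (PySem.List.pyRange 0 (PySem.Chars.find s.toList ("@".toList) - 2) 1).foldl
        (fun l x => l.set x.toNat '#') s.toList
        = List.replicate (PySem.Chars.find s.toList ("@".toList) - 2).toNat '#'
          ++ s.toList.drop (PySem.Chars.find s.toList ("@".toList) - 2).toNat := by
      rw [← hcast, mask_loop _ _ (by omega)]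
      simp only [Int.toNat_natCast]
    rw [hm, build_loop, if_neg hneg]
    apply String.toList_inj.mp
    simp
    rw [PySem.List.slice_from s.toList
      (by rw [show (['@'] : List Char) = "@".toList from rfl]; omega)]
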